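-- pv_equiv track=rewrite | github.com/oneisnot/ruichangmj | ruichang_mj_sim.py | is_peng_peng_hu
-- ===== SOURCE A (Python) =====
-- from collections import Counter
--
-- def is_peng_peng_hu(hand, melds):
--     if len(hand) % 3 != 2: return False
--     c = Counter(hand)
--     pairs = tris = 0
--     for count in c.values():
--         if count == 2: pairs += 1
--         elif count == 3: tris += 1
--         else: return False
--     return pairs == 1
-- ===== SOURCE B (Python) =====
-- def is_peng_peng_hu(hand, melds):
--     if len(hand) % 3 != 2:
--         return False
--     pairs = 0
--     tiles = sorted(hand)
--     while tiles:
--         x, rest = tiles[0], tiles[1:]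
--         run = 1
--         while rest and rest[0] == x:
--             run += 1
--             rest = rest[1:]
--         if run == 2:
--             pairs += 1
--         elif run != 3:
--             return False
--         tiles = rest
--     return pairs == 1
-- ===== Notes on version B (the rewrite author's own statement) =====
-- stated objective: alternative
-- what changed: Replaces the Counter hash tally over distinct values with a sort followed by a single run-length scan of the sorted hand.
import Mathlib
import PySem

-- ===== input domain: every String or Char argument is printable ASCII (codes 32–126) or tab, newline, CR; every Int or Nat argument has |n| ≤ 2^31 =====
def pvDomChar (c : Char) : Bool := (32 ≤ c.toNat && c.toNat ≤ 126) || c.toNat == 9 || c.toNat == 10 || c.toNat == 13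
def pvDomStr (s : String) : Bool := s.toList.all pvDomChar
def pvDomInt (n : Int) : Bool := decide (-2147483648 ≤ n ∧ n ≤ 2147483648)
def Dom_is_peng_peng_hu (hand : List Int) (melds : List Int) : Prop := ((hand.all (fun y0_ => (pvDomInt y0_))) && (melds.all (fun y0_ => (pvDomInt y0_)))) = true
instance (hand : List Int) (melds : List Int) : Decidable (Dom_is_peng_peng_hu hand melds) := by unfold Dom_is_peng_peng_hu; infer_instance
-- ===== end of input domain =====

-- B replaces A's Counter hash tally over distinct values with a sort followed by a run-length scan of the sorted hand (alternative algorithm).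


-- ===== PORT A =====
-- the 'for count in c.values()' loop with its early return
def pvLoopA : List Int → Int → Int → Bool
  | [], pairs, _tris => pairs == 1
  | count :: rest, pairs, tris =>
    if count == 2 then pvLoopA rest (pairs + 1) tris
    else if count == 3 then pvLoopA rest pairs (tris + 1)
    else false

def is_peng_peng_hu (hand : List Int) (_melds : List Int) : Bool :=
  if hand.length % 3 ≠ 2 then false
  else pvLoopA (PySem.Dict.values (PySem.Dict.counter hand)) 0 0

-- ===== PORT B =====
-- the 'while tiles' run-length scan over the sorted hand
def pvScanRuns (l : List Int) (pairs : Int) : Bool :=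
  match l with
  | [] => pairs == 1
  | x :: rest =>
    let run : Int := 1 + ((rest.takeWhile (fun y => y == x)).length : Int)
    if run == 2 then pvScanRuns (rest.dropWhile (fun y => y == x)) (pairs + 1)
    else if run == 3 then pvScanRuns (rest.dropWhile (fun y => y == x)) pairs
    else false
termination_by l.length
decreasing_by
  all_goals
    have := (List.dropWhile_sublist (fun y => y == x) (l := rest)).length_le
    simp; omega

def is_peng_peng_hu_alt (hand : List Int) (_melds : List Int) : Bool :=
  if hand.length % 3 ≠ 2 then false
  else pvScanRuns (PySem.List.sorted hand (fun x => x) false) 0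

-- ===== PRECONDITION & SPEC =====
def Spec_is_peng_peng_hu (hand : List Int) (melds : List Int) (out : Bool) : Prop := out = is_peng_peng_hu_alt hand melds
instance (hand : List Int) (melds : List Int) (out : Bool) : Decidable (Spec_is_peng_peng_hu hand melds out) := by unfold Spec_is_peng_peng_hu; infer_instance

-- ===== CLAIM (what is proved, stated in full; the proofs are below) =====
def Claim_equal_is_peng_peng_hu : Prop := ∀ (hand : List Int) (melds : List Int), Dom_is_peng_peng_hu hand melds → Spec_is_peng_peng_hu hand melds (is_peng_peng_hu hand melds)

-- ===== LEMMAS AND PROOFS =====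

-- order-free check both loops reduce to: distinct elements D, count function cnt
def pvCheck (D : List Int) (cnt : Int → Int) (pairs : Int) : Bool :=
  D.all (fun k => cnt k == 2 || cnt k == 3) && (pairs + (D.countP (fun k => cnt k == 2) : Int) == 1)

theorem pvCheck_cons (x : Int) (D : List Int) (cnt : Int → Int) (pairs : Int) :
    pvCheck (x :: D) cnt pairs =
      if cnt x = 2 then pvCheck D cnt (pairs + 1)
      else if cnt x = 3 then pvCheck D cnt pairs
      else false := by
  unfold pvCheck
  by_cases h2 : cnt x = 2
  · rw [if_pos h2]
    have e : pairs + ((D.countP (fun k => cnt k == 2) : Nat) + 1 : Int)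
        = pairs + 1 + ((D.countP (fun k => cnt k == 2) : Nat) : Int) := by ring
    simp [h2, e]
  · rw [if_neg h2]
    by_cases h3 : cnt x = 3
    · simp [h3]
    · have e2 : (cnt x == 2) = false := by simpa using h2
      have e3 : (cnt x == 3) = false := by simpa using h3
      simp [e2, e3, h3]

theorem pvLoopA_char (vals : List Int) (pairs tris : Int) :
    pvLoopA vals pairs tris
      = (vals.all (fun v => v == 2 || v == 3) && (pairs + (vals.countP (fun v => v == 2) : Int) == 1)) := by
  induction vals generalizing pairs tris with
  | nil => simp [pvLoopA]
  | cons v rest ih =>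
    simp only [pvLoopA, List.all_cons, List.countP_cons]
    by_cases h2 : v = 2
    · subst h2
      rw [if_pos (by decide), ih]
      have e : pairs + 1 + ((rest.countP (fun v => v == 2) : Nat) : Int)
          = pairs + (((rest.countP (fun v => v == 2) : Nat) : Int) + 1) := by ring
      simp [e]
    · by_cases h3 : v = 3
      · subst h3
        rw [if_neg (by decide), if_pos (by decide), ih]
        simp
      · have e2 : (v == 2) = false := by simpa using h2
        have e3 : (v == 3) = false := by simpa using h3
        rw [if_neg (by simp [e2]), if_neg (by simp [e3])]
        simp [e2, e3]

theorem pvCheck_perm {D D' : List Int} (h : D.Perm D') (cnt : Int → Int) (pairs : Int) :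
    pvCheck D cnt pairs = pvCheck D' cnt pairs := by
  unfold pvCheck
  rw [h.countP_eq]
  congr 1
  rw [Bool.eq_iff_iff]
  simp only [List.all_eq_true]
  exact ⟨fun hh y hy => hh y (h.mem_iff.2 hy), fun hh y hy => hh y (h.mem_iff.1 hy)⟩

theorem pvCheck_congr (D : List Int) (cnt cnt' : Int → Int) (pairs : Int)
    (h : ∀ y ∈ D, cnt y = cnt' y) :
    pvCheck D cnt pairs = pvCheck D cnt' pairs := by
  unfold pvCheck
  rw [List.countP_congr (fun y hy => by rw [h y hy])]
  congr 1
  rw [Bool.eq_iff_iff]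
  simp only [List.all_eq_true]
  exact ⟨fun hh y hy => by rw [← h y hy]; exact hh y hy,
         fun hh y hy => by rw [h y hy]; exact hh y hy⟩

-- elements of the run prefix are all equal to the head
theorem pv_mem_takeWhile_eq (x y : Int) (rest : List Int)
    (hy : y ∈ rest.takeWhile (fun z => z == x)) : y = x := by
  have := List.mem_takeWhile_imp (p := fun z => z == x) hy
  simpa using this

-- the head value of a sorted tail does not survive dropWhile (== head)
theorem pv_not_mem_dropWhile (x : Int) :
    ∀ (rest : List Int), (∀ y ∈ rest, x ≤ y) → rest.Pairwise (· ≤ ·) →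
      x ∉ rest.dropWhile (fun y => y == x) := by
  intro rest
  induction rest with
  | nil => simp
  | cons y t ih =>
    intro hle hp
    by_cases hyx : (y == x) = true
    · rw [List.dropWhile_cons, if_pos hyx]
      exact ih (fun z hz => hle z (List.mem_cons_of_mem _ hz)) (List.pairwise_cons.1 hp).2
    · rw [List.dropWhile_cons, if_neg hyx]
      have hxy : x ≤ y := hle y List.mem_cons_self
      have hne : x ≠ y := fun e => hyx (by simp [e])
      intro hmem
      rcases List.mem_cons.1 hmem with rfl | hxt
      · exact hne rfl
      · exact hne (le_antisymm hxy ((List.pairwise_cons.1 hp).1 x hxt))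

-- count of the head of a sorted list = 1 + run-prefix length
theorem pv_count_head (x : Int) (rest : List Int) (h : (x :: rest).Pairwise (· ≤ ·)) :
    (x :: rest).count x = 1 + (rest.takeWhile (fun y => y == x)).length := by
  have hx : ∀ y ∈ rest, x ≤ y := (List.pairwise_cons.1 h).1
  have hrestp : rest.Pairwise (· ≤ ·) := (List.pairwise_cons.1 h).2
  have hsplit : rest.takeWhile (fun y => y == x) ++ rest.dropWhile (fun y => y == x) = rest :=
    List.takeWhile_append_dropWhile
  have ha : (rest.takeWhile (fun y => y == x)).count x
      = (rest.takeWhile (fun y => y == x)).length :=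
    List.count_eq_length.2 (fun y hy => (pv_mem_takeWhile_eq x y rest hy).symm)
  have hb : (rest.dropWhile (fun y => y == x)).count x = 0 :=
    List.count_eq_zero.2 (pv_not_mem_dropWhile x rest hx hrestp)
  calc (x :: rest).count x = rest.count x + 1 := by simp [List.count_cons_self]
    _ = ((rest.takeWhile (fun y => y == x)) ++ (rest.dropWhile (fun y => y == x))).count x + 1 := by
          rw [hsplit]
    _ = 1 + (rest.takeWhile (fun y => y == x)).length := by
          rw [List.count_append, ha, hb]; omega

-- counts of non-head values survive the run removal
theorem pv_count_tail (x y : Int) (rest : List Int) (hy : y ≠ x) :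
    (x :: rest).count y = (rest.dropWhile (fun z => z == x)).count y := by
  have hsplit : rest.takeWhile (fun z => z == x) ++ rest.dropWhile (fun z => z == x) = rest :=
    List.takeWhile_append_dropWhile
  have ha : (rest.takeWhile (fun z => z == x)).count y = 0 :=
    List.count_eq_zero.2 (fun hmem => hy (pv_mem_takeWhile_eq x y rest hmem))
  have h1 : (x :: rest).count y = rest.count y := by
    have hxy : ¬ x = y := fun e => hy e.symm
    simp [hxy]
  rw [h1]
  conv_lhs => rw [← hsplit]
  rw [List.count_append, ha]
  omega

-- dedup of a sorted list is head :: dedup of the tail runs, up to permutation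
theorem pv_dedup_perm (x : Int) (rest : List Int) (h : (x :: rest).Pairwise (· ≤ ·)) :
    (PySem.List.dedup (x :: rest)).Perm
      (x :: PySem.List.dedup (rest.dropWhile (fun y => y == x))) := by
  have hx : ∀ y ∈ rest, x ≤ y := (List.pairwise_cons.1 h).1
  have hrestp : rest.Pairwise (· ≤ ·) := (List.pairwise_cons.1 h).2
  have hxb : x ∉ rest.dropWhile (fun y => y == x) := pv_not_mem_dropWhile x rest hx hrestp
  have hsplit : rest.takeWhile (fun y => y == x) ++ rest.dropWhile (fun y => y == x) = rest :=
    List.takeWhile_append_dropWhile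
  apply (List.perm_ext_iff_of_nodup (PySem.List.nodup_dedup _) ?_).2
  · intro a
    rw [PySem.List.mem_dedup, List.mem_cons, List.mem_cons, PySem.List.mem_dedup]
    constructor
    · rintro (rfl | ha)
      · exact Or.inl rfl
      · rw [← hsplit] at ha
        rcases List.mem_append.1 ha with hta | hda
        · exact Or.inl (pv_mem_takeWhile_eq x a rest hta)
        · exact Or.inr hda
    · rintro (rfl | ha)
      · exact Or.inl rfl
      · exact Or.inr (List.Sublist.mem ha (List.dropWhile_sublist _))
  · exact List.nodup_cons.2 ⟨fun hmem => hxb ((PySem.List.mem_dedup _ _).1 hmem),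
      PySem.List.nodup_dedup _⟩

-- B's scan over a sorted list computes the order-free check
theorem pvScanRuns_char : ∀ (n : Nat) (l : List Int), l.length ≤ n →
    l.Pairwise (· ≤ ·) → ∀ (pairs : Int),
    pvScanRuns l pairs = pvCheck (PySem.List.dedup l) (fun k => (l.count k : Int)) pairs := by
  intro n
  induction n with
  | zero =>
    intro l hl _ pairs
    have : l = [] := List.eq_nil_of_length_eq_zero (Nat.le_zero.1 hl)
    subst this
    simp [pvScanRuns, pvCheck, PySem.List.dedup]
  | succ n ih =>
    intro l hl hp pairs
    cases l with
    | nil => simp [pvScanRuns, pvCheck, PySem.List.dedup]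
    | cons x rest =>
      have hx : ∀ y ∈ rest, x ≤ y := (List.pairwise_cons.1 hp).1
      have hrestp : rest.Pairwise (· ≤ ·) := (List.pairwise_cons.1 hp).2
      have hbp : (rest.dropWhile (fun y => y == x)).Pairwise (· ≤ ·) :=
        List.Pairwise.sublist (List.dropWhile_sublist _) hrestp
      have hblen : (rest.dropWhile (fun y => y == x)).length ≤ n := by
        have := (List.dropWhile_sublist (fun y => y == x) (l := rest)).length_le
        simp at hl; omega
      have hxb : x ∉ rest.dropWhile (fun y => y == x) := pv_not_mem_dropWhile x rest hx hrestp
      have hcnt : ((x :: rest).count x : Int)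
          = 1 + ((rest.takeWhile (fun y => y == x)).length : Int) := by
        have := pv_count_head x rest hp
        omega
      have htail : ∀ y ∈ PySem.List.dedup (rest.dropWhile (fun z => z == x)),
          (((x :: rest).count y : Nat) : Int)
            = (((rest.dropWhile (fun z => z == x)).count y : Nat) : Int) := by
        intro y hy
        have hyb : y ∈ rest.dropWhile (fun z => z == x) := (PySem.List.mem_dedup _ _).1 hy
        have hyx : y ≠ x := fun e => hxb (e ▸ hyb)
        rw [pv_count_tail x y rest hyx]
      rw [pvScanRuns]
      rw [pvCheck_perm (pv_dedup_perm x rest hp), pvCheck_cons]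
      by_cases h2 : (rest.takeWhile (fun y => y == x)).length = 1
      · rw [if_pos (by simp [h2]), if_pos (by rw [hcnt]; omega)]
        rw [ih _ hblen hbp, pvCheck_congr _ _ _ _ htail]
      · by_cases h3 : (rest.takeWhile (fun y => y == x)).length = 2
        · rw [if_neg (by simp [h3]), if_pos (by simp [h3]), if_neg (by rw [hcnt]; omega),
            if_pos (by rw [hcnt]; omega)]
          rw [ih _ hblen hbp, pvCheck_congr _ _ _ _ htail]
        · rw [if_neg (by simp; omega), if_neg (by simp; omega), if_neg (by rw [hcnt]; omega),
            if_neg (by rw [hcnt]; omega)]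

-- ===== VERDICT (by name: the statement is the Claim_ definition above) =====
theorem is_peng_peng_hu_spec : Claim_equal_is_peng_peng_hu := by
  intro hand melds _
  unfold Spec_is_peng_peng_hu is_peng_peng_hu is_peng_peng_hu_alt
  by_cases hg : hand.length % 3 ≠ 2
  · rw [if_pos hg, if_pos hg]
  · rw [if_neg hg, if_neg hg]
    -- A side: Counter values = counts over the distinct elements
    have hvals : PySem.Dict.values (PySem.Dict.counter hand)
        = (PySem.List.dedup hand).map (fun k => ((hand.count k : Nat) : Int)) := by
      show (PySem.Dict.items (PySem.Dict.counter hand)).map (·.2) = _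
      rw [PySem.Dict.items_counter]
      simp [List.map_map, Function.comp_def, PySem.List.dedup_eq_ofList]
    rw [hvals, pvLoopA_char, List.all_map, List.countP_map]
    -- B side
    set s := PySem.List.sorted hand (fun x => x) false with hs
    have hsp : s.Pairwise (· ≤ ·) := by
      have := PySem.List.sorted_pairwise hand (fun x => x)
      simpa [hs] using this
    have hperm : s.Perm hand := PySem.List.sorted_perm hand (fun x => x) false
    rw [pvScanRuns_char s.length s (le_refl _) hsp 0]
    have hdp : (PySem.List.dedup s).Perm (PySem.List.dedup hand) := by
      apply (List.perm_ext_iff_of_nodup (PySem.List.nodup_dedup _) (PySem.List.nodup_dedup _)).2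
      intro a
      rw [PySem.List.mem_dedup, PySem.List.mem_dedup, hperm.mem_iff]
    have hcount : ∀ y ∈ PySem.List.dedup hand,
        ((s.count y : Nat) : Int) = ((hand.count y : Nat) : Int) := by
      intro y _
      rw [hperm.count_eq]
    rw [pvCheck_perm hdp, pvCheck_congr _ _ _ _ hcount]
    simp [pvCheck, Function.comp_def]
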